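-- pv_equiv track=rewrite | github.com/qsimeon/functiongemma-hackathon | fork_solutions/Unknown-Blaze_main.py | _trim_segment
-- ===== SOURCE A (Python) =====
-- def _trim_segment(text):
--     cut_tokens = [
--         ",",
--         ", and ",
--         " and ",
--         ".",
--         "?",
--         "!",
--     ]
--     out = text.strip()
--     for token in cut_tokens:
--         pos = out.lower().find(token)
--         if pos != -1:
--             out = out[:pos].strip()
--     return out.strip(" .,!?")
-- ===== SOURCE B (Python) =====
-- def _trim_segment(text):
--     s = text.strip()
--     low = s.lower()
--     m = len(s)
--     for i in range(len(s)):
--         if s[i] in ",.?!" or low.startswith(" and ", i):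
--             m = i
--             break
--     return s[:m].strip().strip(" .,!?")
-- ===== Notes on version B (the rewrite author's own statement) =====
-- stated objective: alternative
-- what changed: A's six mutate-and-rescan passes (one find+strip per cut token) are replaced by a single left-to-right scan of the stripped text that stops at the earliest cut token (punctuation character or case-insensitive ' and ') followed by one slice and one cleanup strip.
-- intended difference: On inputs whose stripped text's earliest cut token is a case-insensitive ' and ' followed only by whitespace up to a comma, A's comma-pass strip erases that occurrence before A searches for it, so A returns the whole prefix up to the comma (ending in the conjunction word), while B returns the text cut at that earliest token, the intended earliest-cut-token behaviour. — e.g. on _trim_segment("x and ,y"): A returns "x and", B returns "x"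
import Mathlib
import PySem

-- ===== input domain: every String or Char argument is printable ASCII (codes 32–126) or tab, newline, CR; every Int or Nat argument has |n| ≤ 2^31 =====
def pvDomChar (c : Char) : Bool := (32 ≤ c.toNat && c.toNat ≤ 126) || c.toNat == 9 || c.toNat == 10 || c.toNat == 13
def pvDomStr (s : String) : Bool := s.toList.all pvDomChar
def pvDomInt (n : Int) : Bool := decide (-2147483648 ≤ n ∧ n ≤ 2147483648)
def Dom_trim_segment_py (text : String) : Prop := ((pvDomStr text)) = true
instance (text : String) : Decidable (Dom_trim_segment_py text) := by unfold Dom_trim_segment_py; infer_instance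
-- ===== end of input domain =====

-- B replaces A's six mutate-and-rescan find/strip passes by one left-to-right scan that stops at the
-- earliest cut token (objective: alternative single-pass decomposition); on the corner described at
-- D_trim_segment_py below, B cuts where A's comma-pass strip swallows an " and ".

-- ===== PORT A =====
def aStep (out : String) (token : String) : String :=
  let pos := PySem.Str.find (PySem.Str.lower out) token
  if pos ≠ -1 then PySem.Str.strip (PySem.Str.slice out none (some pos)) else out

def trim_segment_py (text : String) : String :=
  let cut_tokens : List String := [",", ", and ", " and ", ".", "?", "!"]
  let out := cut_tokens.foldl aStep (PySem.Str.strip text)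
  PySem.Str.stripChars out " .,!?"

-- ===== PORT B =====
-- port of Source B's single scan: for i in range(len(s)): if s[i] in ",.?!" or low.startswith(" and ", i): break
def altScan : List Char → List Char → Nat → Nat
  | c :: srest, lowSuf, i =>
      if c = ',' ∨ c = '.' ∨ c = '?' ∨ c = '!' ∨ " and ".toList.isPrefixOf lowSuf then i
      else altScan srest (lowSuf.drop 1) (i + 1)
  | [], _, i => i

def trim_segment_py_alt (text : String) : String :=
  let s := PySem.Str.strip text
  let low := PySem.Str.lower s
  let m := altScan s.toList low.toList 0
  PySem.Str.stripChars (PySem.Str.strip (PySem.Str.slice s none (some (m : Int)))) " .,!?"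

-- ===== PRECONDITION & SPEC =====
-- helpers for D_ (they only inspect the input): after a swallowed " and ", is the rest of the
-- lowered stripped text whitespace-only up to a comma?
def pvDAfter : List Char → Bool
  | [] => false
  | c :: r => if c = ',' then true else if PySem.Chars.isspace c then pvDAfter r else false

-- is the earliest cut token of the lowered stripped text an " and " that is followed only by
-- whitespace up to a comma?
def pvDFirst : List Char → Bool
  | [] => false
  | l :: rest =>
      if l = ',' ∨ l = '.' ∨ l = '?' ∨ l = '!' then false
      else if " and ".toList.isPrefixOf (l :: rest) then pvDAfter (rest.drop 4)
      else pvDFirst rest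

-- On inputs whose stripped text's earliest cut token is a case-insensitive " and " that is followed
-- only by whitespace up to a comma, A's comma-pass strip erases that " and " before A searches for it,
-- so A returns the text up to the comma (ending in "and"), while B cuts at the " and " itself, which is
-- the intended earliest-cut-token behaviour.
def D_trim_segment_py (text : String) : Prop :=
  pvDFirst (PySem.Chars.lower (PySem.Chars.strip text.toList)) = true
instance (text : String) : Decidable (D_trim_segment_py text) := by
  unfold D_trim_segment_py; infer_instance

def Spec_trim_segment_py (text : String) (out : String) : Prop :=
  ¬ D_trim_segment_py text → out = trim_segment_py_alt text
instance (text : String) (out : String) : Decidable (Spec_trim_segment_py text out) := by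
  unfold Spec_trim_segment_py; infer_instance

def pvDiffWitness_trim_segment_py : String := "x and  ,y"
def pvDiffWitnessOut_trim_segment_py : String × String := ("x and", "x")

-- ===== CLAIM (what is proved, stated in full; the proofs are below) =====
def Claim_unchanged_trim_segment_py : Prop :=
  ∀ (text : String), Dom_trim_segment_py text → Spec_trim_segment_py text (trim_segment_py text)
def Claim_changed_trim_segment_py : Prop :=
  Dom_trim_segment_py (pvDiffWitness_trim_segment_py) ∧
  D_trim_segment_py (pvDiffWitness_trim_segment_py) ∧
  trim_segment_py (pvDiffWitness_trim_segment_py) = pvDiffWitnessOut_trim_segment_py.1 ∧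
  trim_segment_py_alt (pvDiffWitness_trim_segment_py) = pvDiffWitnessOut_trim_segment_py.2 ∧
  pvDiffWitnessOut_trim_segment_py.1 ≠ pvDiffWitnessOut_trim_segment_py.2
def Claim_exact_trim_segment_py : Prop :=
  ∀ (text : String), Dom_trim_segment_py text → D_trim_segment_py text →
    trim_segment_py text ≠ trim_segment_py_alt text

-- ===== LEMMAS AND PROOFS =====

-- the Chars-level shape of one pass of A's loop, and the "rstripped prefix" states it moves through
def stepC (tok : List Char) (u : List Char) : List Char :=
  let pos := PySem.Chars.find (PySem.Chars.lower u) tok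
  if pos ≠ -1 then PySem.Chars.strip (u.take pos.toNat) else u

def pvU (s : List Char) (e : Nat) : List Char := PySem.Chars.rstrip (s.take e)

lemma pv_rstrip_append_ws (u : List Char) :
    ∃ w, u = PySem.Chars.rstrip u ++ w ∧ ∀ c ∈ w, PySem.Chars.isspace c = true := by
  refine ⟨(u.reverse.takeWhile PySem.Chars.isspace).reverse, ?_, ?_⟩
  · rw [PySem.Chars.rstrip, ← List.reverse_append, List.takeWhile_append_dropWhile,
      List.reverse_reverse]
  · intro c hc
    exact List.mem_takeWhile_imp (List.mem_reverse.mp hc)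

lemma pv_rstrip_prefix (u : List Char) : PySem.Chars.rstrip u <+: u := by
  obtain ⟨w, hw, -⟩ := pv_rstrip_append_ws u
  exact ⟨w, hw.symm⟩

lemma pv_lt_length_rstrip {u : List Char} {j : Nat} {c : Char}
    (h : u[j]? = some c) (hc : PySem.Chars.isspace c = false) :
    j < (PySem.Chars.rstrip u).length := by
  obtain ⟨w, hw, hws⟩ := pv_rstrip_append_ws u
  by_contra hle
  push Not at hle
  rw [hw, List.getElem?_append_right (by omega)] at h
  have : c ∈ w := List.mem_of_getElem? h
  rw [hws c this] at hc; exact absurd hc (by simp)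

lemma pv_prefix_take_eq {v u : List Char} (h : v <+: u) {k : Nat} (hk : k ≤ v.length) :
    v.take k = u.take k := by
  obtain ⟨w, rfl⟩ := h
  rw [List.take_append_of_le_length hk]

lemma pv_lstrip_of_prefix {v' v : List Char} (hp : v' <+: v)
    (h : PySem.Chars.lstrip v = v) : PySem.Chars.lstrip v' = v' := by
  unfold PySem.Chars.lstrip at *
  rw [List.dropWhile_eq_self_iff] at *
  intro hl
  rw [hp.getElem hl]
  exact h (lt_of_lt_of_le hl hp.length_le)

lemma pv_strip_take {u : List Char} (h : PySem.Chars.lstrip u = u) (k : Nat) :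
    PySem.Chars.strip (u.take k) = PySem.Chars.rstrip (u.take k) := by
  unfold PySem.Chars.strip
  rw [pv_lstrip_of_prefix (List.take_prefix k u) h]

lemma pv_lstrip_idem (t : List Char) :
    PySem.Chars.lstrip (PySem.Chars.lstrip t) = PySem.Chars.lstrip t := by
  unfold PySem.Chars.lstrip
  exact List.dropWhile_idempotent ..

lemma pv_lstrip_strip (t : List Char) :
    PySem.Chars.lstrip (PySem.Chars.strip t) = PySem.Chars.strip t := by
  unfold PySem.Chars.strip
  exact pv_lstrip_of_prefix (pv_rstrip_prefix _) (pv_lstrip_idem t)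

lemma pv_rstrip_strip (t : List Char) :
    PySem.Chars.rstrip (PySem.Chars.strip t) = PySem.Chars.strip t := by
  unfold PySem.Chars.strip PySem.Chars.rstrip
  rw [List.reverse_reverse, List.dropWhile_idempotent]

lemma pv_toNat_lowerChar_upper {c : Char} (h : PySem.Chars.isupper c = true) :
    (PySem.Chars.lowerChar c).toNat = c.toNat + 32 ∧ 65 ≤ c.toNat ∧ c.toNat ≤ 90 := by
  have hb : 65 ≤ c.toNat ∧ c.toNat ≤ 90 := by
    simp [PySem.Chars.isupper, Char.le_def, UInt32.le_iff_toNat_le] at h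
    exact ⟨h.1, h.2⟩
  refine ⟨?_, hb.1, hb.2⟩
  have hv : (c.toNat + 32).isValidChar := by unfold Nat.isValidChar; omega
  simp [PySem.Chars.lowerChar, h, Char.toNat_ofNat, hv]

lemma pv_isspace_false_of_range {c : Char} (h1 : 33 ≤ c.toNat) (h2 : c.toNat ≤ 126) :
    PySem.Chars.isspace c = false := by
  simp [PySem.Chars.isspace]
  omega

lemma pv_isspace_lowerChar (c : Char) :
    PySem.Chars.isspace (PySem.Chars.lowerChar c) = PySem.Chars.isspace c := by
  by_cases h : PySem.Chars.isupper c = true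
  · obtain ⟨h1, h2, h3⟩ := pv_toNat_lowerChar_upper h
    rw [pv_isspace_false_of_range (by omega) (by omega),
      pv_isspace_false_of_range (c := c) (by omega) (by omega)]
  · simp [PySem.Chars.lowerChar, h]

lemma pv_lowerChar_eq_low {c d : Char} (hd : d.toNat < 65) :
    PySem.Chars.lowerChar c = d ↔ c = d := by
  by_cases h : PySem.Chars.isupper c = true
  · obtain ⟨h1, h2, h3⟩ := pv_toNat_lowerChar_upper h
    constructor
    · intro he
      have := he ▸ h1
      omega
    · intro he
      subst he
      omega
  · simp [PySem.Chars.lowerChar, h]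

lemma pv_lower_length (u : List Char) : (PySem.Chars.lower u).length = u.length := by
  simp [PySem.Chars.lower]

lemma pv_lower_getElem? (u : List Char) (j : Nat) :
    (PySem.Chars.lower u)[j]? = u[j]?.map PySem.Chars.lowerChar := by
  simp [PySem.Chars.lower]

lemma pv_lower_rstrip (u : List Char) :
    PySem.Chars.lower (PySem.Chars.rstrip u) = PySem.Chars.rstrip (PySem.Chars.lower u) := by
  have hfun : (fun c => PySem.Chars.isspace (PySem.Chars.lowerChar c)) = PySem.Chars.isspace :=
    funext pv_isspace_lowerChar
  simp only [PySem.Chars.rstrip, PySem.Chars.lower, ← List.map_reverse, List.dropWhile_map,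
    Function.comp_def, hfun]

lemma pv_lower_take (u : List Char) (k : Nat) :
    PySem.Chars.lower (u.take k) = (PySem.Chars.lower u).take k := by
  simp [PySem.Chars.lower, List.map_take]

lemma pv_singleton_prefix_drop (c : Char) (v : List Char) (j : Nat) :
    [c] <+: v.drop j ↔ v[j]? = some c := by
  rw [← List.head?_drop]
  constructor
  · rintro ⟨w, hw⟩; rw [← hw]; rfl
  · intro h
    rcases hd : v.drop j with _ | ⟨a, w⟩
    · rw [hd] at h; simp at h
    · rw [hd] at h
      simp only [List.head?_cons, Option.some.injEq] at h
      exact ⟨w, by rw [h]; rfl⟩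

lemma pv_prefix_drop_mono {v w sub : List Char} (h : v <+: w) {j : Nat}
    (hp : sub <+: v.drop j) : sub <+: w.drop j := hp.trans (h.drop j)

lemma pv_take_drop_prefix {w sub : List Char} {j L : Nat}
    (hp : sub <+: w.drop j) (hL : j + sub.length ≤ L) : sub <+: (w.take L).drop j := by
  rw [List.drop_take]
  obtain ⟨x, hx⟩ := hp
  refine ⟨x.take (L - j - sub.length), ?_⟩
  rw [← hx, List.take_append, List.take_of_length_le (l := sub) (by omega)]

lemma pv_find_eq_iff_first {v sub : List Char} {k : Nat}
    (h1 : sub <+: v.drop k) (h2 : ∀ i < k, ¬ sub <+: v.drop i) :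
    PySem.Chars.find v sub = (k : Int) := by
  have hnn : 0 ≤ PySem.Chars.find v sub := by
    rw [PySem.Chars.find_nonneg_iff, ← PySem.Chars.isIn_iff_infix,
      ← PySem.Chars.exists_prefix_drop_iff_isIn]
    exact ⟨k, h1⟩
  obtain ⟨ho, hmin⟩ := PySem.Chars.find_spec hnn
  have h5 : (PySem.Chars.find v sub).toNat = k := by
    rcases lt_trichotomy (PySem.Chars.find v sub).toNat k with h | h | h
    · exact absurd ho (h2 _ h)
    · exact h
    · exact absurd h1 (hmin _ h)
  omega

lemma pv_drop_succ (l : List Char) (K : Nat) : l.tail.drop K = l.drop (K + 1) := by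
  rw [← List.drop_one, List.drop_drop, Nat.add_comm]

lemma altScan_shift (s' : List Char) : ∀ (low' : List Char) (k : Nat),
    altScan s' low' k = k + altScan s' low' 0 := by
  induction s' with
  | nil => intro low' k; simp [altScan]
  | cons c srest ih =>
    intro low' k
    rw [altScan, altScan]
    split
    · simp
    · rw [ih _ (k+1), ih _ 1]
      omega

-- the stripped text has a cut token starting at index i
abbrev pvHitAt (s low : List Char) (i : Nat) : Prop :=
  s[i]? = some ',' ∨ s[i]? = some '.' ∨ s[i]? = some '?' ∨ s[i]? = some '!' ∨
    " and ".toList <+: low.drop i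

def hitRel (s' low' : List Char) : Prop :=
  (∃ c, s'.head? = some c ∧ (c = ',' ∨ c = '.' ∨ c = '?' ∨ c = '!')) ∨ " and ".toList <+: low'

lemma altScan_spec (s' : List Char) : ∀ (low' : List Char),
    altScan s' low' 0 ≤ s'.length ∧
    (∀ j < altScan s' low' 0, ¬ hitRel (s'.drop j) (low'.drop j)) ∧
    (altScan s' low' 0 < s'.length →
      hitRel (s'.drop (altScan s' low' 0)) (low'.drop (altScan s' low' 0))) := by
  induction s' with
  | nil => intro low'; simp [altScan]
  | cons c srest ih =>
    intro low'
    rw [altScan]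
    split
    · rename_i hc
      refine ⟨by simp, by omega, fun _ => ?_⟩
      simp only [List.drop_zero]
      rcases hc with h | h | h | h | h
      · exact Or.inl ⟨c, rfl, Or.inl h⟩
      · exact Or.inl ⟨c, rfl, Or.inr (Or.inl h)⟩
      · exact Or.inl ⟨c, rfl, Or.inr (Or.inr (Or.inl h))⟩
      · exact Or.inl ⟨c, rfl, Or.inr (Or.inr (Or.inr h))⟩
      · exact Or.inr (List.isPrefixOf_iff_prefix.mp h)
    · rename_i hc
      rw [altScan_shift, List.drop_one]
      obtain ⟨ih1, ih2, ih3⟩ := ih (low'.tail)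
      have e0 : 0 + 1 + altScan srest low'.tail 0 = altScan srest low'.tail 0 + 1 := by omega
      rw [e0]
      refine ⟨by simp; omega, ?_, ?_⟩
      · intro j hj
        rcases j with _ | j
        · simp only [List.drop_zero]
          rintro (⟨d, hd, hpd⟩ | hpre)
          · simp only [List.head?_cons, Option.some.injEq] at hd
            subst hd
            tauto
          · exact hc (Or.inr (Or.inr (Or.inr (Or.inr (List.isPrefixOf_iff_prefix.mpr hpre)))))
        · have hh := ih2 j (by omega)
          rw [pv_drop_succ] at hh
          rw [List.drop_succ_cons]
          exact hh
      · intro hlt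
        have hh := ih3 (by simp at hlt; omega)
        rw [pv_drop_succ] at hh
        rw [List.drop_succ_cons]
        exact hh

lemma pvHitAt_iff (s low : List Char) (i : Nat) :
    pvHitAt s low i ↔ hitRel (s.drop i) (low.drop i) := by
  unfold pvHitAt hitRel
  rw [← List.head?_drop]
  constructor
  · rintro (h | h | h | h | h)
    · exact Or.inl ⟨',', h, by tauto⟩
    · exact Or.inl ⟨'.', h, by tauto⟩
    · exact Or.inl ⟨'?', h, by tauto⟩
    · exact Or.inl ⟨'!', h, by tauto⟩
    · exact Or.inr h
  · rintro (⟨c, hc, hp⟩ | h)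
    · rcases hp with rfl | rfl | rfl | rfl <;> tauto
    · tauto

lemma pvDAfter_pos : ∀ (v : List Char) (c : Nat), v[c]? = some ',' →
    (∀ j, j < c → ∀ x, v[j]? = some x → PySem.Chars.isspace x = true) →
    pvDAfter v = true := by
  intro v
  induction v with
  | nil => intro c hc _; simp at hc
  | cons a r ih =>
    intro c hc hws
    rcases c with _ | c
    · simp only [List.getElem?_cons_zero, Option.some_inj] at hc
      rw [pvDAfter, if_pos hc]
    · have ha := hws 0 (by omega) a rfl
      by_cases hca : a = ','
      · rw [pvDAfter, if_pos hca]
      · rw [pvDAfter, if_neg hca, if_pos ha]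
        exact ih c (by simpa using hc)
          (fun j hj x hx => hws (j + 1) (by omega) x (by simpa using hx))

lemma pvDFirst_pos : ∀ (low : List Char) (p : Nat),
    (∀ i, i < p →
      ¬ ((low[i]? = some ',' ∨ low[i]? = some '.' ∨ low[i]? = some '?' ∨ low[i]? = some '!') ∨
        " and ".toList <+: low.drop i)) →
    " and ".toList <+: low.drop p →
    pvDFirst low = pvDAfter (low.drop (p + 5)) := by
  intro low
  induction low with
  | nil =>
    intro p _ hand
    have := hand.length_le
    simp at this
  | cons l rest ih =>
    intro p hbef hand
    rcases p with _ | p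
    · have hand0 : " and ".toList <+: (l :: rest) := by simpa using hand
      have hl : l = ' ' := by
        have h0 : (' ' :: "and ".toList) <+: (l :: rest) := by
          have e : (' ' :: "and ".toList) = (" and ".toList : List Char) := by decide
          rw [e]; exact hand0
        exact (List.cons_prefix_cons.mp h0).1.symm
      rw [pvDFirst, if_neg (by rw [hl]; decide),
        if_pos (List.isPrefixOf_iff_prefix.mpr hand0)]
      simp [List.drop_succ_cons]
    · have h0 := hbef 0 (by omega)
      push Not at h0
      obtain ⟨⟨h1, h2, h3, h4⟩, h5⟩ := h0
      rw [pvDFirst,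
        if_neg (by
          simp only [List.getElem?_cons_zero] at h1 h2 h3 h4
          tauto),
        if_neg (by
          intro hpre
          exact h5 (by simpa using List.isPrefixOf_iff_prefix.mp hpre))]
      have hres := ih p
        (fun i hi h => hbef (i + 1) (by omega) (by
          rcases h with (hh | hh | hh | hh) | hh
          · exact Or.inl (Or.inl (by simpa using hh))
          · exact Or.inl (Or.inr (Or.inl (by simpa using hh)))
          · exact Or.inl (Or.inr (Or.inr (Or.inl (by simpa using hh))))
          · exact Or.inl (Or.inr (Or.inr (Or.inr (by simpa using hh))))
          · exact Or.inr (by simpa [List.drop_succ_cons] using hh)))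
        (by simpa [List.drop_succ_cons] using hand)
      simpa [List.drop_succ_cons] using hres

lemma pvDAfter_elim : ∀ (v : List Char), pvDAfter v = true →
    ∃ c : Nat, v[c]? = some ',' ∧
      ∀ j, j < c → ∀ x, v[j]? = some x → PySem.Chars.isspace x = true := by
  intro v
  induction v with
  | nil => intro h; simp [pvDAfter] at h
  | cons a r ih =>
    intro h
    rw [pvDAfter] at h
    by_cases hca : a = ','
    · exact ⟨0, by simp [hca], by omega⟩
    · rw [if_neg hca] at h
      by_cases hws : PySem.Chars.isspace a = true
      · rw [if_pos hws] at h
        obtain ⟨c, hc, hall⟩ := ih h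
        refine ⟨c + 1, by simpa using hc, ?_⟩
        intro j hj x hx
        rcases j with _ | j
        · simp only [List.getElem?_cons_zero, Option.some_inj] at hx
          rw [← hx]; exact hws
        · exact hall j (by omega) x (by simpa using hx)
      · rw [if_neg hws] at h
        simp at h

lemma pvDFirst_elim : ∀ (low : List Char), pvDFirst low = true →
    ∃ p : Nat,
      (∀ i, i < p →
        ¬ ((low[i]? = some ',' ∨ low[i]? = some '.' ∨ low[i]? = some '?' ∨ low[i]? = some '!') ∨
          " and ".toList <+: low.drop i)) ∧
      " and ".toList <+: low.drop p ∧ pvDAfter (low.drop (p + 5)) = true := by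
  intro low
  induction low with
  | nil => intro h; simp [pvDFirst] at h
  | cons l rest ih =>
    intro h
    rw [pvDFirst] at h
    by_cases h1 : l = ',' ∨ l = '.' ∨ l = '?' ∨ l = '!'
    · rw [if_pos h1] at h; simp at h
    · rw [if_neg h1] at h
      by_cases h2 : " and ".toList.isPrefixOf (l :: rest) = true
      · rw [if_pos h2] at h
        refine ⟨0, by omega, by simpa using List.isPrefixOf_iff_prefix.mp h2, ?_⟩
        simpa [List.drop_succ_cons] using h
      · rw [if_neg h2] at h
        obtain ⟨p, hbef, hand, haft⟩ := ih h
        refine ⟨p + 1, ?_, by simpa [List.drop_succ_cons] using hand,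
          by simpa [List.drop_succ_cons] using haft⟩
        intro i hi hh
        rcases i with _ | i
        · rcases hh with (hc | hc | hc | hc) | hc
          · simp only [List.getElem?_cons_zero, Option.some_inj] at hc
            exact h1 (Or.inl hc)
          · simp only [List.getElem?_cons_zero, Option.some_inj] at hc
            exact h1 (Or.inr (Or.inl hc))
          · simp only [List.getElem?_cons_zero, Option.some_inj] at hc
            exact h1 (Or.inr (Or.inr (Or.inl hc)))
          · simp only [List.getElem?_cons_zero, Option.some_inj] at hc
            exact h1 (Or.inr (Or.inr (Or.inr hc)))
          · exact h2 (List.isPrefixOf_iff_prefix.mpr (by simpa using hc))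
        · refine hbef i (by omega) ?_
          rcases hh with (hc | hc | hc | hc) | hc
          · exact Or.inl (Or.inl (by simpa using hc))
          · exact Or.inl (Or.inr (Or.inl (by simpa using hc)))
          · exact Or.inl (Or.inr (Or.inr (Or.inl (by simpa using hc))))
          · exact Or.inl (Or.inr (Or.inr (Or.inr (by simpa using hc))))
          · exact Or.inr (by simpa [List.drop_succ_cons] using hc)

lemma pv_stripChars_self {v W : List Char} (hv : v ≠ [])
    (hhead : ∀ x, v[0]? = some x → W.contains x = false)
    (hlast : ∀ x, v[v.length - 1]? = some x → W.contains x = false) :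
    PySem.Chars.stripChars v W = v := by
  have hlen : 0 < v.length := List.length_pos_iff.mpr hv
  simp only [PySem.Chars.stripChars]
  have h1 : List.dropWhile (fun c => W.contains c) v = v := by
    rw [List.dropWhile_eq_self_iff]
    intro hl
    have := hhead v[0] (List.getElem?_eq_getElem hl)
    simpa using this
  rw [h1]
  have h2 : List.dropWhile (fun c => W.contains c) v.reverse = v.reverse := by
    rw [List.dropWhile_eq_self_iff]
    intro hl
    rw [List.getElem_reverse]
    simp only [Nat.sub_zero]
    have := hlast v[v.length - 1] (List.getElem?_eq_getElem (by omega))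
    simpa using this
  rw [h2, List.reverse_reverse]

lemma pv_stripChars_length_le (v W : List Char) :
    (PySem.Chars.stripChars v W).length ≤ v.length := by
  simp only [PySem.Chars.stripChars]
  calc (List.dropWhile _ (List.dropWhile _ v).reverse).reverse.length
      ≤ (List.dropWhile (fun c => W.contains c) v).reverse.length := by
        rw [List.length_reverse]
        exact le_trans (List.length_dropWhile_le _ _) (by rw [List.length_reverse])
    _ ≤ v.length := by
        rw [List.length_reverse]
        exact List.length_dropWhile_le _ _

lemma pv_rstrip_last_not_ws {u : List Char} (h : PySem.Chars.rstrip u ≠ []) :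
    ∃ x, (PySem.Chars.rstrip u)[(PySem.Chars.rstrip u).length - 1]? = some x ∧
      PySem.Chars.isspace x = false := by
  have hlen : 0 < (PySem.Chars.rstrip u).length := List.length_pos_iff.mpr h
  refine ⟨(PySem.Chars.rstrip u).getLast h, ?_, ?_⟩
  · rw [List.getLast_eq_getElem, List.getElem?_eq_getElem (by omega)]
  · have h' : List.dropWhile PySem.Chars.isspace u.reverse ≠ [] := by
      intro he
      apply h
      unfold PySem.Chars.rstrip
      rw [he]
      rfl
    have := List.head_dropWhile_not PySem.Chars.isspace h'
    have hg : (PySem.Chars.rstrip u).getLast h =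
        (List.dropWhile PySem.Chars.isspace u.reverse).head h' := by
      unfold PySem.Chars.rstrip
      rw [List.getLast_reverse]
    rw [hg]
    exact this

lemma pv_prefix_window (low : List Char) {mm : Nat}
    (hA5 : " and ".toList <+: low.drop mm) {t : Nat} (ht : t < 5) :
    low[mm + t]? = (" and ".toList : List Char)[t]? := by
  obtain ⟨w, hw⟩ := hA5
  have ht' : t < (" and ".toList : List Char).length := by
    have : (" and ".toList : List Char).length = 5 := by decide
    omega
  rw [← List.getElem?_drop, ← hw, List.getElem?_append_left ht']

-- pvU basics
lemma pvU_prefix (s : List Char) (e : Nat) : pvU s e <+: s :=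
  (pv_rstrip_prefix _).trans (List.take_prefix e s)

lemma pvU_len_le (s : List Char) (e : Nat) : (pvU s e).length ≤ e :=
  le_trans (pv_rstrip_prefix _).length_le (by simp)

lemma pvU_getElem? (s : List Char) (e : Nat) {q : Nat} (h : q < (pvU s e).length) :
    (pvU s e)[q]? = s[q]? := by
  rw [List.getElem?_eq_getElem h, (pvU_prefix s e).getElem h,
    List.getElem?_eq_getElem (lt_of_lt_of_le h (pvU_prefix s e).length_le)]
  rfl

lemma pv_lower_pvU (s : List Char) (e : Nat) :
    PySem.Chars.lower (pvU s e) = pvU (PySem.Chars.lower s) e := by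
  unfold pvU
  rw [pv_lower_rstrip, pv_lower_take]

lemma pvU_take (s : List Char) (e : Nat) {k : Nat} (h : k ≤ (pvU s e).length) :
    (pvU s e).take k = s.take k := by
  rw [pv_prefix_take_eq (pvU_prefix s e) h]

lemma pvU_full {s : List Char} (h : PySem.Chars.rstrip s = s) : pvU s s.length = s := by
  unfold pvU
  rw [List.take_of_length_le (le_refl _), h]

lemma pvU_lt_len {s : List Char} {e j : Nat} {c : Char} (hj : j < e) (h : s[j]? = some c)
    (hns : PySem.Chars.isspace c = false) : j < (pvU s e).length := by
  apply pv_lt_length_rstrip (c := c) _ hns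
  rw [List.getElem?_take_of_lt hj]
  exact h

lemma pv_stepC_none {u tok : List Char} (h : PySem.Chars.find (PySem.Chars.lower u) tok = -1) :
    stepC tok u = u := by
  simp [stepC, h]

lemma pv_stepC_found {u tok : List Char} {q : Nat}
    (h : PySem.Chars.find (PySem.Chars.lower u) tok = (q : Int)) :
    stepC tok u = PySem.Chars.strip (u.take q) := by
  simp [stepC, h]

lemma pv_occ_head {s : List Char} {e : Nat} {d : Char} {rest : List Char} {q : Nat}
    (hd : d.toNat < 65) (h : (d :: rest) <+: (PySem.Chars.lower (pvU s e)).drop q) :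
    q < (pvU s e).length ∧ s[q]? = some d := by
  have h1 : [d] <+: (PySem.Chars.lower (pvU s e)).drop q :=
    List.IsPrefix.trans ⟨rest, rfl⟩ h
  rw [pv_singleton_prefix_drop] at h1
  rw [pv_lower_getElem?, Option.map_eq_some_iff] at h1
  obtain ⟨c, hc1, hc2⟩ := h1
  rw [pv_lowerChar_eq_low hd] at hc2
  subst hc2
  have hlt : q < (pvU s e).length := by
    by_contra hge
    rw [List.getElem?_eq_none (by omega)] at hc1
    simp at hc1
  refine ⟨hlt, ?_⟩
  rw [← pvU_getElem? s e hlt]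
  exact hc1

lemma pv_occ_and {s : List Char} {e : Nat} {q : Nat}
    (h : " and ".toList <+: (PySem.Chars.lower (pvU s e)).drop q) :
    q + 5 ≤ (pvU s e).length ∧ " and ".toList <+: (PySem.Chars.lower s).drop q := by
  constructor
  · have h5 := h.length_le
    simp only [List.length_drop, pv_lower_length] at h5
    have : " and ".toList.length = 5 := by decide
    omega
  · exact pv_prefix_drop_mono (by rw [pv_lower_pvU]; exact pvU_prefix _ _) h

lemma pv_find_none_of_no_occ {v sub : List Char}
    (h : ∀ j, ¬ sub <+: v.drop j) : PySem.Chars.find v sub = -1 := by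
  rw [PySem.Chars.find_eq_neg_one_iff]
  intro hinf
  rw [← PySem.Chars.isIn_iff_infix, ← PySem.Chars.exists_prefix_drop_iff_isIn] at hinf
  obtain ⟨j, hj⟩ := hinf
  exact h j hj

lemma pv_step_none_head (s : List Char) (d : Char) (rest : List Char) (e : Nat)
    (hd : d.toNat < 65) (hno : ∀ q, q < (pvU s e).length → s[q]? ≠ some d) :
    stepC (d :: rest) (pvU s e) = pvU s e := by
  apply pv_stepC_none
  apply pv_find_none_of_no_occ
  intro j hj
  obtain ⟨hlt, hq⟩ := pv_occ_head hd hj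
  exact hno j hlt hq

lemma pv_step_cut (s : List Char) (m : Nat) (d : Char) (e : Nat) (hd : d.toNat < 65)
    (hlstrip : PySem.Chars.lstrip s = s) (hm : s[m]? = some d)
    (hlen : m < (pvU s e).length) (hmin : ∀ q, q < m → s[q]? ≠ some d) :
    stepC [d] (pvU s e) = pvU s m := by
  have hfind : PySem.Chars.find (PySem.Chars.lower (pvU s e)) [d] = (m : Int) := by
    apply pv_find_eq_iff_first
    · rw [pv_singleton_prefix_drop, pv_lower_getElem?, pvU_getElem? s e hlen, hm,
        Option.map_some]
      have : PySem.Chars.lowerChar d = d := (pv_lowerChar_eq_low hd).mpr rfl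
      rw [this]
    · intro i hi hocc
      obtain ⟨hlt, hq⟩ := pv_occ_head hd hocc
      exact hmin i hi hq
  rw [pv_stepC_found hfind, pvU_take s e (le_of_lt hlen), pv_strip_take hlstrip]
  rfl

lemma pv_step_and_cut (s : List Char) (m : Nat) (e : Nat)
    (hlstrip : PySem.Chars.lstrip s = s)
    (hocc : " and ".toList <+: (PySem.Chars.lower s).drop m)
    (hlen5 : m + 5 ≤ (pvU s e).length)
    (hmin : ∀ q, q < m → ¬ " and ".toList <+: (PySem.Chars.lower s).drop q) :
    stepC " and ".toList (pvU s e) = pvU s m := by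
  have hL : (PySem.Chars.lower (pvU s e)) = (PySem.Chars.lower s).take (pvU s e).length := by
    rw [pv_lower_pvU]
    have hp : pvU (PySem.Chars.lower s) e <+: PySem.Chars.lower s := pvU_prefix _ _
    have hlen : (pvU (PySem.Chars.lower s) e).length = (pvU s e).length := by
      unfold pvU
      rw [← pv_lower_take, ← pv_lower_rstrip, pv_lower_length]
    have heq := List.prefix_iff_eq_take.mp hp
    rw [hlen] at heq
    exact heq
  have hfind : PySem.Chars.find (PySem.Chars.lower (pvU s e)) " and ".toList = (m : Int) := by
    apply pv_find_eq_iff_first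
    · rw [hL]
      exact pv_take_drop_prefix hocc (by simpa using hlen5)
    · intro i hi hocc'
      exact hmin i hi (pv_occ_and hocc').2
  rw [pv_stepC_found hfind, pvU_take s e (by omega), pv_strip_take hlstrip]
  rfl

lemma pv_step_and_none (s : List Char) (e : Nat)
    (hno : ∀ q, q + 5 ≤ (pvU s e).length → ¬ " and ".toList <+: (PySem.Chars.lower s).drop q) :
    stepC " and ".toList (pvU s e) = pvU s e := by
  apply pv_stepC_none
  apply pv_find_none_of_no_occ
  intro j hj
  obtain ⟨h5, hocc⟩ := pv_occ_and hj
  exact hno j h5 hocc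

lemma pv_step_any (s : List Char) (m : Nat) (d dm : Char) (e : Nat) (hd : d.toNat < 65)
    (hlstrip : PySem.Chars.lstrip s = s) (hsm : s[m]? = some dm)
    (hns : PySem.Chars.isspace dm = false) (hne : dm ≠ d)
    (hmin : ∀ q, q < m → s[q]? ≠ some d) (hlen : m < (pvU s e).length) :
    ∃ L, stepC [d] (pvU s e) = pvU s L ∧ m < (pvU s L).length := by
  by_cases hf : PySem.Chars.find (PySem.Chars.lower (pvU s e)) [d] = -1
  · exact ⟨e, pv_stepC_none hf, hlen⟩
  · have hnn : 0 ≤ PySem.Chars.find (PySem.Chars.lower (pvU s e)) [d] := by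
      have := PySem.Chars.neg_one_le_find (PySem.Chars.lower (pvU s e)) [d]
      omega
    set q := (PySem.Chars.find (PySem.Chars.lower (pvU s e)) [d]).toNat with hq
    have hfq : PySem.Chars.find (PySem.Chars.lower (pvU s e)) [d] = (q : Int) := by omega
    obtain ⟨hoccq, -⟩ := PySem.Chars.find_spec hnn
    rw [← hq] at hoccq
    obtain ⟨hqlt, hsq⟩ := pv_occ_head hd hoccq
    have hqm : m < q := by
      rcases lt_trichotomy q m with h | h | h
      · exact absurd hsq (hmin q h)
      · subst h
        rw [hsm] at hsq
        exact absurd (Option.some_inj.mp hsq) hne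
      · exact h
    refine ⟨q, ?_, ?_⟩
    · rw [pv_stepC_found hfq, pvU_take s e (le_of_lt hqlt), pv_strip_take hlstrip]
      rfl
    · exact pvU_lt_len hqm hsm hns

lemma pv_step_and_any (s : List Char) (m : Nat) (dm : Char) (e : Nat)
    (hlstrip : PySem.Chars.lstrip s = s) (hsm : s[m]? = some dm)
    (hns : PySem.Chars.isspace dm = false) (hne : dm ≠ ' ')
    (hmin : ∀ q, q < m → ¬ " and ".toList <+: (PySem.Chars.lower s).drop q)
    (hlen : m < (pvU s e).length) :
    ∃ L, stepC " and ".toList (pvU s e) = pvU s L ∧ m < (pvU s L).length := by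
  by_cases hf : PySem.Chars.find (PySem.Chars.lower (pvU s e)) " and ".toList = -1
  · exact ⟨e, pv_stepC_none hf, hlen⟩
  · have hnn : 0 ≤ PySem.Chars.find (PySem.Chars.lower (pvU s e)) " and ".toList := by
      have := PySem.Chars.neg_one_le_find (PySem.Chars.lower (pvU s e)) " and ".toList
      omega
    set q := (PySem.Chars.find (PySem.Chars.lower (pvU s e)) " and ".toList).toNat with hq
    have hfq : PySem.Chars.find (PySem.Chars.lower (pvU s e)) " and ".toList = (q : Int) := by
      omega
    obtain ⟨hoccq, -⟩ := PySem.Chars.find_spec hnn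
    rw [← hq] at hoccq
    obtain ⟨hq5, hoccl⟩ := pv_occ_and hoccq
    have hsp : s[q]? = some ' ' := by
      have h1 : (' ' :: "and ".toList) <+: (PySem.Chars.lower (pvU s e)).drop q := by
        have : (' ' :: "and ".toList) = " and ".toList := by decide
        rw [this]; exact hoccq
      exact (pv_occ_head (by decide) h1).2
    have hqm : m < q := by
      rcases lt_trichotomy q m with h | h | h
      · exact absurd hoccl (hmin q h)
      · subst h
        rw [hsm] at hsp
        exact absurd (Option.some_inj.mp hsp) hne
      · exact h
    refine ⟨q, ?_, ?_⟩
    · rw [pv_stepC_found hfq, pvU_take s e (by omega), pv_strip_take hlstrip]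
      rfl
    · exact pvU_lt_len hqm hsm hns

lemma aStep_toList (u tok : String) :
    (aStep u tok).toList = stepC tok.toList u.toList := by
  simp only [aStep, stepC, PySem.Str.find_eq, PySem.Str.toList_lower]
  by_cases h : PySem.Chars.find (PySem.Chars.lower u.toList) tok.toList = -1
  · rw [if_neg (by omega), if_neg (by omega)]
  · have hnn : 0 ≤ PySem.Chars.find (PySem.Chars.lower u.toList) tok.toList := by
      have := PySem.Chars.neg_one_le_find (PySem.Chars.lower u.toList) tok.toList
      omega
    rw [if_pos (by omega), if_pos (by omega), PySem.Str.toList_strip, PySem.Str.toList_slice,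
      PySem.Chars.slice_eq_listSlice, PySem.List.slice_to _ hnn]

lemma pv_state3 (s : List Char) (m : Nat) (dm : Char)
    (hs_l : PySem.Chars.lstrip s = s) (hs_r : PySem.Chars.rstrip s = s)
    (hm_lt : m < s.length)
    (hsm : s[m]? = some dm) (hns : PySem.Chars.isspace dm = false)
    (hncm : dm ≠ ',') (hnsp : dm ≠ ' ')
    (hnoC : ∀ q, q < m → s[q]? ≠ some ',')
    (hnoAnd : ∀ q, q < m → ¬ (" and ".toList <+: (PySem.Chars.lower s).drop q)) :
    ∃ e, stepC " and ".toList (stepC (',' :: " and ".toList) (stepC [','] s)) = pvU s e ∧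
      m < (pvU s e).length := by
  have hUn : pvU s s.length = s := pvU_full hs_r
  have hUnlen : (pvU s s.length).length = s.length := by rw [hUn]
  by_cases hcom : ∃ q : Nat, s[q]? = some ','
  · have hc : s[Nat.find hcom]? = some ',' := Nat.find_spec hcom
    set c := Nat.find hcom with hcdef
    have hcmin : ∀ q, q < c → s[q]? ≠ some ',' := fun q hq => Nat.find_min hcom hq
    have hcn : c < s.length := (List.getElem?_eq_some_iff.mp hc).1
    have hmc : m < c := by
      rcases lt_trichotomy c m with h | h | h
      · exact absurd hc (hnoC c h)
      · subst h
        rw [hsm] at hc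
        exact absurd (Option.some_inj.mp hc) hncm
      · exact h
    have s1 : stepC [','] s = pvU s c := by
      conv_lhs => rw [← hUn]
      exact pv_step_cut s c ',' s.length (by decide) hs_l hc (by rw [hUnlen]; omega) hcmin
    have hlenc : m < (pvU s c).length := pvU_lt_len hmc hsm hns
    have s2 : stepC (',' :: " and ".toList) (pvU s c) = pvU s c :=
      pv_step_none_head s ',' _ c (by decide)
        (fun q hq => hcmin q (lt_of_lt_of_le hq (pvU_len_le s c)))
    obtain ⟨L, s3, hL⟩ := pv_step_and_any s m dm c hs_l hsm hns hnsp hnoAnd hlenc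
    exact ⟨L, by rw [s1, s2, s3], hL⟩
  · have hnc : ∀ q, s[q]? ≠ some ',' := fun q h => hcom ⟨q, h⟩
    have s1 : stepC [','] s = pvU s s.length := by
      conv_lhs => rw [← hUn]
      exact pv_step_none_head s ',' [] s.length (by decide) (fun q _ => hnc q)
    have s2 : stepC (',' :: " and ".toList) (pvU s s.length) = pvU s s.length :=
      pv_step_none_head s ',' _ s.length (by decide) (fun q _ => hnc q)
    have hlenn : m < (pvU s s.length).length := by rw [hUnlen]; exact hm_lt
    obtain ⟨L, s3, hL⟩ := pv_step_and_any s m dm s.length hs_l hsm hns hnsp hnoAnd hlenn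
    exact ⟨L, by rw [s1, s2, s3], hL⟩

lemma pv_chain_punct (s : List Char) (m : Nat) (dm : Char)
    (hs_l : PySem.Chars.lstrip s = s) (hs_r : PySem.Chars.rstrip s = s)
    (hm_lt : m < s.length)
    (hdm : dm = '.' ∨ dm = '?' ∨ dm = '!')
    (hsm : s[m]? = some dm)
    (hnoC : ∀ q, q < m → s[q]? ≠ some ',')
    (hnoD : ∀ q, q < m → s[q]? ≠ some '.')
    (hnoQ : ∀ q, q < m → s[q]? ≠ some '?')
    (hnoE : ∀ q, q < m → s[q]? ≠ some '!')
    (hnoAnd : ∀ q, q < m → ¬ (" and ".toList <+: (PySem.Chars.lower s).drop q)) :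
    stepC ['!'] (stepC ['?'] (stepC ['.'] (stepC " and ".toList
      (stepC (',' :: " and ".toList) (stepC [','] s))))) = pvU s m := by
  have hlenmle : (pvU s m).length ≤ m := pvU_len_le s m
  have hns : PySem.Chars.isspace dm = false := by
    rcases hdm with rfl | rfl | rfl <;> decide
  have hncm : dm ≠ ',' := by rcases hdm with rfl | rfl | rfl <;> decide
  have hnsp : dm ≠ ' ' := by rcases hdm with rfl | rfl | rfl <;> decide
  obtain ⟨e3, s123, hlen3⟩ :=
    pv_state3 s m dm hs_l hs_r hm_lt hsm hns hncm hnsp hnoC hnoAnd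
  rw [s123]
  have s5Q : stepC ['?'] (pvU s m) = pvU s m :=
    pv_step_none_head s '?' [] m (by decide) (fun q hq => hnoQ q (lt_of_lt_of_le hq hlenmle))
  have s6E : stepC ['!'] (pvU s m) = pvU s m :=
    pv_step_none_head s '!' [] m (by decide) (fun q hq => hnoE q (lt_of_lt_of_le hq hlenmle))
  rcases hdm with rfl | rfl | rfl
  · have s4 : stepC ['.'] (pvU s e3) = pvU s m :=
      pv_step_cut s m '.' e3 (by decide) hs_l hsm hlen3 hnoD
    rw [s4, s5Q, s6E]
  · obtain ⟨L4, s4, hL4⟩ :=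
      pv_step_any s m '.' '?' e3 (by decide) hs_l hsm (by decide) (by decide) hnoD hlen3
    have s5 : stepC ['?'] (pvU s L4) = pvU s m :=
      pv_step_cut s m '?' L4 (by decide) hs_l hsm hL4 hnoQ
    rw [s4, s5, s6E]
  · obtain ⟨L4, s4, hL4⟩ :=
      pv_step_any s m '.' '!' e3 (by decide) hs_l hsm (by decide) (by decide) hnoD hlen3
    obtain ⟨L5, s5, hL5⟩ :=
      pv_step_any s m '?' '!' L4 (by decide) hs_l hsm (by decide) (by decide) hnoQ hL4
    have s6 : stepC ['!'] (pvU s L5) = pvU s m :=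
      pv_step_cut s m '!' L5 (by decide) hs_l hsm hL5 hnoE
    rw [s4, s5, s6]

lemma pv_chain_and (s : List Char) (m : Nat)
    (hs_l : PySem.Chars.lstrip s = s) (hs_r : PySem.Chars.rstrip s = s)
    (hm_lt : m < s.length)
    (hA5 : " and ".toList <+: (PySem.Chars.lower s).drop m)
    (hnoC : ∀ q, q < m → s[q]? ≠ some ',')
    (hnoD : ∀ q, q < m → s[q]? ≠ some '.')
    (hnoQ : ∀ q, q < m → s[q]? ≠ some '?')
    (hnoE : ∀ q, q < m → s[q]? ≠ some '!')
    (hnoAnd : ∀ q, q < m → ¬ (" and ".toList <+: (PySem.Chars.lower s).drop q))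
    (hwin : ∀ c, m + 5 ≤ c → s[c]? = some ',' →
      (∀ j, m + 5 ≤ j → j < c → PySem.Chars.isspace (s.getD j ' ') = true) → False) :
    stepC ['!'] (stepC ['?'] (stepC ['.'] (stepC " and ".toList
      (stepC (',' :: " and ".toList) (stepC [','] s))))) = pvU s m := by
  have hUn : pvU s s.length = s := pvU_full hs_r
  have hUnlen : (pvU s s.length).length = s.length := by rw [hUn]
  have hlenmle : (pvU s m).length ≤ m := pvU_len_le s m
  have hand5 : (" and ".toList : List Char).length = 5 := by decide
  -- after the " and " cut everything is below m, so the last three passes do nothing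
  have htail : ∀ u, u = pvU s m →
      stepC ['!'] (stepC ['?'] (stepC ['.'] u)) = pvU s m := by
    rintro u rfl
    rw [pv_step_none_head s '.' [] m (by decide) (fun q hq => hnoD q (lt_of_lt_of_le hq hlenmle)),
      pv_step_none_head s '?' [] m (by decide) (fun q hq => hnoQ q (lt_of_lt_of_le hq hlenmle)),
      pv_step_none_head s '!' [] m (by decide) (fun q hq => hnoE q (lt_of_lt_of_le hq hlenmle))]
  by_cases hcom : ∃ q : Nat, s[q]? = some ','
  · have hc : s[Nat.find hcom]? = some ',' := Nat.find_spec hcom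
    set c := Nat.find hcom with hcdef
    have hcmin : ∀ q, q < c → s[q]? ≠ some ',' := fun q hq => Nat.find_min hcom hq
    have hcn : c < s.length := (List.getElem?_eq_some_iff.mp hc).1
    have hmc : m ≤ c := by
      by_contra h'
      exact hnoC c (by omega) hc
    -- c cannot lie inside the " and " occurrence
    have hc5 : m + 5 ≤ c := by
      by_contra hlt
      have ht : c - m < (" and ".toList : List Char).length := by omega
      have hcl : (PySem.Chars.lower s)[c]? = some ',' := by
        rw [pv_lower_getElem?, hc, Option.map_some,
          (pv_lowerChar_eq_low (by decide)).mpr rfl]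
      have h1 : ((PySem.Chars.lower s).drop m)[c - m]? =
          some ((" and ".toList : List Char)[c - m]'ht) := by
        obtain ⟨w, hw⟩ := hA5
        rw [← hw, List.getElem?_append_left ht, List.getElem?_eq_getElem ht]
      have h2 : ((PySem.Chars.lower s).drop m)[c - m]? = (PySem.Chars.lower s)[c]? := by
        rw [List.getElem?_drop]
        congr 1
        omega
      rw [h2, hcl, Option.some_inj] at h1
      have hmem : (',' : Char) ∈ (" and ".toList : List Char) := h1 ▸ List.getElem_mem ht
      exact absurd hmem (by decide)
    obtain ⟨j, hj5, hjc, hjns⟩ : ∃ j, m + 5 ≤ j ∧ j < c ∧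
        PySem.Chars.isspace (s.getD j ' ') = false := by
      by_contra hall
      push Not at hall
      exact hwin c hc5 hc (fun j h1 h2 => by
        have := hall j h1 h2
        simpa using this)
    have hjn : j < s.length := by omega
    have hsj : s[j]? = some (s.getD j ' ') := by
      rw [List.getD_eq_getElem?_getD, List.getElem?_eq_getElem hjn]
      rfl
    have s1 : stepC [','] s = pvU s c := by
      conv_lhs => rw [← hUn]
      exact pv_step_cut s c ',' s.length (by decide) hs_l hc (by rw [hUnlen]; omega) hcmin
    have s2 : stepC (',' :: " and ".toList) (pvU s c) = pvU s c :=
      pv_step_none_head s ',' _ c (by decide)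
        (fun q hq => hcmin q (lt_of_lt_of_le hq (pvU_len_le s c)))
    have hlen5 : m + 5 ≤ (pvU s c).length := by
      have := pvU_lt_len hjc hsj hjns
      omega
    have s3 : stepC " and ".toList (pvU s c) = pvU s m :=
      pv_step_and_cut s m c hs_l hA5 hlen5 hnoAnd
    rw [s1, s2, s3]
    exact htail _ rfl
  · have hnc : ∀ q, s[q]? ≠ some ',' := fun q h => hcom ⟨q, h⟩
    have s1 : stepC [','] s = pvU s s.length := by
      conv_lhs => rw [← hUn]
      exact pv_step_none_head s ',' [] s.length (by decide) (fun q _ => hnc q)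
    have s2 : stepC (',' :: " and ".toList) (pvU s s.length) = pvU s s.length :=
      pv_step_none_head s ',' _ s.length (by decide) (fun q _ => hnc q)
    have hlen5 : m + 5 ≤ (pvU s s.length).length := by
      rw [hUnlen]
      have h5 := hA5.length_le
      simp only [List.length_drop, pv_lower_length, hand5] at h5
      omega
    have s3 : stepC " and ".toList (pvU s s.length) = pvU s m :=
      pv_step_and_cut s m s.length hs_l hA5 hlen5 hnoAnd
    rw [s1, s2, s3]
    exact htail _ rfl

-- ===== VERDICT (by name: the statement is the Claim_ definition above) =====
theorem trim_segment_py_spec : Claim_unchanged_trim_segment_py := by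
  intro text _
  unfold Spec_trim_segment_py
  intro hnd
  apply String.toList_inj.mp
  set s : List Char := PySem.Chars.strip text.toList with hs
  set low : List Char := PySem.Chars.lower s with hlow
  set n : Nat := s.length with hn
  set m : Nat := altScan s low 0 with hm
  have hs_l : PySem.Chars.lstrip s = s := pv_lstrip_strip text.toList
  have hs_r : PySem.Chars.rstrip s = s := pv_rstrip_strip text.toList
  have hUn : pvU s n = s := pvU_full hs_r
  have hUnlen : (pvU s n).length = n := by rw [hUn]
  obtain ⟨hm_le, hrel_no, hrel_hit⟩ := altScan_spec s low
  have hno : ∀ j, j < m → ¬ pvHitAt s low j :=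
    fun j hj h => hrel_no j hj ((pvHitAt_iff s low j).mp h)
  have hnoC : ∀ q, q < m → s[q]? ≠ some ',' := fun q hq h => hno q hq (Or.inl h)
  have hnoD : ∀ q, q < m → s[q]? ≠ some '.' := fun q hq h => hno q hq (Or.inr (Or.inl h))
  have hnoQ : ∀ q, q < m → s[q]? ≠ some '?' :=
    fun q hq h => hno q hq (Or.inr (Or.inr (Or.inl h)))
  have hnoE : ∀ q, q < m → s[q]? ≠ some '!' :=
    fun q hq h => hno q hq (Or.inr (Or.inr (Or.inr (Or.inl h))))
  have hnoAnd : ∀ q, q < m → ¬ (" and ".toList <+: (PySem.Chars.lower s).drop q) := by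
    intro q hq h
    rw [← hlow] at h
    exact hno q hq (Or.inr (Or.inr (Or.inr (Or.inr h))))
  have hA : (trim_segment_py text).toList =
      PySem.Chars.stripChars
        (stepC "!".toList (stepC "?".toList (stepC ".".toList (stepC " and ".toList
          (stepC ", and ".toList (stepC ",".toList s)))))) (" .,!?".toList) := by
    simp only [trim_segment_py, List.foldl_cons, List.foldl_nil, PySem.Str.toList_stripChars,
      aStep_toList, PySem.Str.toList_strip, ← hs]
  have hB : (trim_segment_py_alt text).toList =
      PySem.Chars.stripChars (PySem.Chars.strip (s.take m)) (" .,!?".toList) := by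
    simp only [trim_segment_py_alt, PySem.Str.toList_stripChars, PySem.Str.toList_strip,
      PySem.Str.toList_slice, PySem.Chars.slice_eq_listSlice, PySem.Str.toList_lower,
      ← hs, ← hlow, ← hm]
    rw [PySem.List.slice_to _ (by positivity)]
    simp
  rw [hA, hB, pv_strip_take hs_l]
  have t1 : (",".toList : List Char) = [','] := by decide
  have t2 : (", and ".toList : List Char) = ',' :: " and ".toList := by decide
  have t4 : (".".toList : List Char) = ['.'] := by decide
  have t5 : ("?".toList : List Char) = ['?'] := by decide
  have t6 : ("!".toList : List Char) = ['!'] := by decide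
  rw [t1, t2, t4, t5, t6]
  suffices hchain : stepC ['!'] (stepC ['?'] (stepC ['.'] (stepC " and ".toList
      (stepC (',' :: " and ".toList) (stepC [','] s))))) = pvU s m by
    rw [hchain]
    rfl
  by_cases hmn : m = n
  · -- no cut token anywhere: every pass leaves the string unchanged
    have hnoall : ∀ j, j < n → ¬ pvHitAt s low j := by rw [← hmn]; exact hno
    have hncAll : ∀ q : Nat, s[q]? ≠ some ',' := by
      intro q h
      obtain ⟨hq, -⟩ := List.getElem?_eq_some_iff.mp h
      exact hnoall q hq (Or.inl h)
    have hndAll : ∀ q : Nat, s[q]? ≠ some '.' := by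
      intro q h
      obtain ⟨hq, -⟩ := List.getElem?_eq_some_iff.mp h
      exact hnoall q hq (Or.inr (Or.inl h))
    have hnqAll : ∀ q : Nat, s[q]? ≠ some '?' := by
      intro q h
      obtain ⟨hq, -⟩ := List.getElem?_eq_some_iff.mp h
      exact hnoall q hq (Or.inr (Or.inr (Or.inl h)))
    have hneAll : ∀ q : Nat, s[q]? ≠ some '!' := by
      intro q h
      obtain ⟨hq, -⟩ := List.getElem?_eq_some_iff.mp h
      exact hnoall q hq (Or.inr (Or.inr (Or.inr (Or.inl h))))
    have hnaAll : ∀ q : Nat, q + 5 ≤ n → ¬ (" and ".toList <+: (PySem.Chars.lower s).drop q) := by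
      intro q hq h
      rw [← hlow] at h
      exact hnoall q (by omega) (Or.inr (Or.inr (Or.inr (Or.inr h))))
    have s1 : stepC [','] s = s := by
      conv_lhs => rw [← hUn]
      rw [pv_step_none_head s ',' [] n (by decide) (fun q _ => hncAll q), hUn]
    have s2 : stepC (',' :: " and ".toList) s = s := by
      conv_lhs => rw [← hUn]
      rw [pv_step_none_head s ',' _ n (by decide) (fun q _ => hncAll q), hUn]
    have s3 : stepC " and ".toList s = s := by
      conv_lhs => rw [← hUn]
      rw [pv_step_and_none s n (fun q h5 => hnaAll q (by rw [hUnlen] at h5; exact h5)), hUn]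
    have s4 : stepC ['.'] s = s := by
      conv_lhs => rw [← hUn]
      rw [pv_step_none_head s '.' [] n (by decide) (fun q _ => hndAll q), hUn]
    have s5 : stepC ['?'] s = s := by
      conv_lhs => rw [← hUn]
      rw [pv_step_none_head s '?' [] n (by decide) (fun q _ => hnqAll q), hUn]
    have s6 : stepC ['!'] s = s := by
      conv_lhs => rw [← hUn]
      rw [pv_step_none_head s '!' [] n (by decide) (fun q _ => hneAll q), hUn]
    rw [s1, s2, s3, s4, s5, s6, hmn]
    exact hUn.symm
  · have hm_lt : m < n := lt_of_le_of_ne hm_le hmn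
    have hhitm : pvHitAt s low m := (pvHitAt_iff s low m).mpr (hrel_hit hm_lt)
    have hlenmle : (pvU s m).length ≤ m := pvU_len_le s m
    rcases hhitm with hC | hD | hQ | hE | hA5
    · -- earliest cut token is the first comma
      have s1 : stepC [','] s = pvU s m := by
        conv_lhs => rw [← hUn]
        exact pv_step_cut s m ',' n (by decide) hs_l hC (by rw [hUnlen]; exact hm_lt) hnoC
      have s2 : stepC (',' :: " and ".toList) (pvU s m) = pvU s m :=
        pv_step_none_head s ',' _ m (by decide)
          (fun q hq => hnoC q (lt_of_lt_of_le hq hlenmle))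
      have s3 : stepC " and ".toList (pvU s m) = pvU s m :=
        pv_step_and_none s m (fun q h5 => hnoAnd q (by omega))
      have s4 : stepC ['.'] (pvU s m) = pvU s m :=
        pv_step_none_head s '.' [] m (by decide)
          (fun q hq => hnoD q (lt_of_lt_of_le hq hlenmle))
      have s5 : stepC ['?'] (pvU s m) = pvU s m :=
        pv_step_none_head s '?' [] m (by decide)
          (fun q hq => hnoQ q (lt_of_lt_of_le hq hlenmle))
      have s6 : stepC ['!'] (pvU s m) = pvU s m :=
        pv_step_none_head s '!' [] m (by decide)
          (fun q hq => hnoE q (lt_of_lt_of_le hq hlenmle))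
      rw [s1, s2, s3, s4, s5, s6]
    · exact pv_chain_punct s m '.' hs_l hs_r hm_lt (Or.inl rfl) hD hnoC hnoD hnoQ hnoE hnoAnd
    · exact pv_chain_punct s m '?' hs_l hs_r hm_lt (Or.inr (Or.inl rfl)) hQ hnoC hnoD hnoQ hnoE hnoAnd
    · exact pv_chain_punct s m '!' hs_l hs_r hm_lt (Or.inr (Or.inr rfl)) hE hnoC hnoD hnoQ hnoE hnoAnd
    · -- earliest cut token is a case-insensitive " and "
      have hA5' : " and ".toList <+: (PySem.Chars.lower s).drop m := by
        rw [← hlow]; exact hA5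
      have hwin : ∀ c, m + 5 ≤ c → s[c]? = some ',' →
          (∀ j, m + 5 ≤ j → j < c → PySem.Chars.isspace (s.getD j ' ') = true) → False := by
        intro c hc5 hc hall
        obtain ⟨hcn, -⟩ := List.getElem?_eq_some_iff.mp hc
        apply hnd
        show pvDFirst low = true
        rw [pvDFirst_pos low m ?hbef hA5]
        case hbef =>
          intro i hi h
          apply hno i hi
          rcases h with (hh | hh | hh | hh) | hh
          · refine Or.inl ?_
            rw [hlow, pv_lower_getElem?, Option.map_eq_some_iff] at hh
            obtain ⟨c0, hc0, he⟩ := hh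
            rw [pv_lowerChar_eq_low (by decide)] at he
            rw [hc0, he]
          · refine Or.inr (Or.inl ?_)
            rw [hlow, pv_lower_getElem?, Option.map_eq_some_iff] at hh
            obtain ⟨c0, hc0, he⟩ := hh
            rw [pv_lowerChar_eq_low (by decide)] at he
            rw [hc0, he]
          · refine Or.inr (Or.inr (Or.inl ?_))
            rw [hlow, pv_lower_getElem?, Option.map_eq_some_iff] at hh
            obtain ⟨c0, hc0, he⟩ := hh
            rw [pv_lowerChar_eq_low (by decide)] at he
            rw [hc0, he]
          · refine Or.inr (Or.inr (Or.inr (Or.inl ?_)))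
            rw [hlow, pv_lower_getElem?, Option.map_eq_some_iff] at hh
            obtain ⟨c0, hc0, he⟩ := hh
            rw [pv_lowerChar_eq_low (by decide)] at he
            rw [hc0, he]
          · exact Or.inr (Or.inr (Or.inr (Or.inr hh)))
        apply pvDAfter_pos (low.drop (m + 5)) (c - (m + 5))
        · rw [List.getElem?_drop]
          have he : m + 5 + (c - (m + 5)) = c := by omega
          rw [he, hlow, pv_lower_getElem?, hc, Option.map_some,
            (pv_lowerChar_eq_low (by decide)).mpr rfl]
        · intro j' hj' x hx
          rw [List.getElem?_drop] at hx
          have hjc : m + 5 + j' < c := by omega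
          have hjlen : m + 5 + j' < n := by omega
          rw [hlow, pv_lower_getElem?, List.getElem?_eq_getElem hjlen, Option.map_some,
            Option.some_inj] at hx
          rw [← hx, pv_isspace_lowerChar]
          have hget := hall (m + 5 + j') (by omega) hjc
          rw [List.getD_eq_getElem?_getD, List.getElem?_eq_getElem hjlen] at hget
          exact hget
      exact pv_chain_and s m hs_l hs_r hm_lt hA5' hnoC hnoD hnoQ hnoE hnoAnd hwin


theorem trim_segment_py_tight : Claim_exact_trim_segment_py := by
  intro text _ hD
  set s : List Char := PySem.Chars.strip text.toList with hs
  set low : List Char := PySem.Chars.lower s with hlow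
  set n : Nat := s.length with hn
  set m : Nat := altScan s low 0 with hm
  have hs_l : PySem.Chars.lstrip s = s := pv_lstrip_strip text.toList
  have hs_r : PySem.Chars.rstrip s = s := pv_rstrip_strip text.toList
  have hUn : pvU s n = s := pvU_full hs_r
  have hUnlen : (pvU s n).length = n := by rw [hUn]
  obtain ⟨hm_le, hrel_no, hrel_hit⟩ := altScan_spec s low
  have hno : ∀ j, j < m → ¬ pvHitAt s low j :=
    fun j hj h => hrel_no j hj ((pvHitAt_iff s low j).mp h)
  have hnoC : ∀ q, q < m → s[q]? ≠ some ',' := fun q hq h => hno q hq (Or.inl h)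
  have hnoD : ∀ q, q < m → s[q]? ≠ some '.' := fun q hq h => hno q hq (Or.inr (Or.inl h))
  have hnoQ : ∀ q, q < m → s[q]? ≠ some '?' :=
    fun q hq h => hno q hq (Or.inr (Or.inr (Or.inl h)))
  have hnoE : ∀ q, q < m → s[q]? ≠ some '!' :=
    fun q hq h => hno q hq (Or.inr (Or.inr (Or.inr (Or.inl h))))
  have hnoAnd : ∀ q, q < m → ¬ (" and ".toList <+: (PySem.Chars.lower s).drop q) := by
    intro q hq h
    rw [← hlow] at h
    exact hno q hq (Or.inr (Or.inr (Or.inr (Or.inr h))))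
  have hl2s : ∀ (i : Nat) (d : Char), d.toNat < 65 → low[i]? = some d → s[i]? = some d := by
    intro i d hd hh
    rw [hlow, pv_lower_getElem?, Option.map_eq_some_iff] at hh
    obtain ⟨c0, hc0, he⟩ := hh
    rw [pv_lowerChar_eq_low hd] at he
    rw [hc0, he]
  have hs2l : ∀ (i : Nat) (d : Char), d.toNat < 65 → s[i]? = some d → low[i]? = some d := by
    intro i d hd hh
    rw [hlow, pv_lower_getElem?, hh, Option.map_some, (pv_lowerChar_eq_low hd).mpr rfl]
  have hs0ns : ∀ x, s[0]? = some x → PySem.Chars.isspace x = false := by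
    intro x hx
    have h0lt : 0 < s.length := (List.getElem?_eq_some_iff.mp hx).1
    have hh := hs_l
    rw [PySem.Chars.lstrip, List.dropWhile_eq_self_iff] at hh
    have hns := hh h0lt
    rw [List.getElem?_eq_getElem h0lt, Option.some_inj] at hx
    rw [← hx]
    simpa using hns
  have hD' : pvDFirst low = true := hD
  obtain ⟨p, hbef, hand, haft⟩ := pvDFirst_elim low hD'
  have hlowlen : low.length = n := by rw [hlow]; exact pv_lower_length s
  have hpn : p + 5 ≤ n := by
    have h5 := hand.length_le
    simp only [List.length_drop] at h5
    have he5 : (" and ".toList : List Char).length = 5 := by decide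
    omega
  have hbef' : ∀ i, i < p → ¬ pvHitAt s low i := by
    intro i hi h
    apply hbef i hi
    rcases h with hh | hh | hh | hh | hh
    · exact Or.inl (Or.inl (hs2l i ',' (by decide) hh))
    · exact Or.inl (Or.inr (Or.inl (hs2l i '.' (by decide) hh)))
    · exact Or.inl (Or.inr (Or.inr (Or.inl (hs2l i '?' (by decide) hh))))
    · exact Or.inl (Or.inr (Or.inr (Or.inr (hs2l i '!' (by decide) hh))))
    · exact Or.inr hh
  have hpm : m = p := by
    rcases lt_trichotomy m p with h | h | h
    · exact absurd ((pvHitAt_iff s low m).mpr (hrel_hit (by omega))) (hbef' m h)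
    · exact h
    · exact absurd (Or.inr (Or.inr (Or.inr (Or.inr hand))) : pvHitAt s low p) (hno p h)
  rw [← hpm] at hand haft hpn
  have hm_lt : m < n := by omega
  obtain ⟨c', hc'get, hws'⟩ := pvDAfter_elim _ haft
  rw [List.getElem?_drop] at hc'get
  set c : Nat := m + 5 + c' with hcdef
  have hsc : s[c]? = some ',' := hl2s c ',' (by decide) hc'get
  have hcn : c < n := (List.getElem?_eq_some_iff.mp hsc).1
  have hwsS : ∀ j x, m + 5 ≤ j → j < c → s[j]? = some x → PySem.Chars.isspace x = true := by
    intro j x h1 h2 hx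
    have hlx : low[j]? = some (PySem.Chars.lowerChar x) := by
      rw [hlow, pv_lower_getElem?, hx, Option.map_some]
    have hv : (low.drop (m + 5))[j - (m + 5)]? = some (PySem.Chars.lowerChar x) := by
      rw [List.getElem?_drop, show m + 5 + (j - (m + 5)) = j by omega]
      exact hlx
    have hres := hws' (j - (m + 5)) (by omega) _ hv
    rw [pv_isspace_lowerChar] at hres
    exact hres
  have hcmin : ∀ q, q < c → s[q]? ≠ some ',' := by
    intro q hq hqc
    rcases Nat.lt_or_ge q m with h | h
    · exact hnoC q h hqc
    · by_cases h5 : q < m + 5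
      · have hw := pv_prefix_window low hand (t := q - m) (by omega)
        rw [show m + (q - m) = q by omega] at hw
        have hql := hs2l q ',' (by decide) hqc
        rw [hw] at hql
        exact absurd (List.mem_of_getElem? hql) (by decide)
      · have := hwsS q ',' (by omega) hq hqc
        exact absurd this (by decide)
  have hd3get : ∃ x, s[m + 3]? = some x ∧ PySem.Chars.isspace x = false := by
    have hw := pv_prefix_window low hand (t := 3) (by omega)
    have he3 : ((" and ".toList : List Char))[3]? = some 'd' := by decide
    rw [he3, hlow, pv_lower_getElem?, Option.map_eq_some_iff] at hw
    obtain ⟨x, hx1, hx2⟩ := hw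
    refine ⟨x, hx1, ?_⟩
    rw [← pv_isspace_lowerChar, hx2]
    decide
  obtain ⟨x3, hx3, hx3ns⟩ := hd3get
  have hlen_lb : m + 3 < (pvU s c).length := pvU_lt_len (by omega) hx3 hx3ns
  have hlen_ub : (pvU s c).length ≤ m + 4 := by
    by_contra hgt
    push Not at hgt
    have hne : PySem.Chars.rstrip (s.take c) ≠ [] := by
      intro he
      have : (pvU s c).length = 0 := by rw [pvU, he]; rfl
      omega
    obtain ⟨y, hy, hyns⟩ := pv_rstrip_last_not_ws hne
    have hLle : (pvU s c).length ≤ c := pvU_len_le s c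
    have hsy : s[(pvU s c).length - 1]? = some y := by
      rw [← pvU_getElem? s c (by omega)]
      exact hy
    rcases Nat.lt_or_ge ((pvU s c).length - 1) (m + 5) with hc1 | hc2
    · have he1 : (pvU s c).length - 1 = m + 4 := by omega
      have hw := pv_prefix_window low hand (t := 4) (by omega)
      have he4 : ((" and ".toList : List Char))[4]? = some ' ' := by decide
      rw [he4, show m + 4 = (pvU s c).length - 1 from he1.symm] at hw
      have h1 : low[(pvU s c).length - 1]? = some (PySem.Chars.lowerChar y) := by
        rw [hlow, pv_lower_getElem?, hsy, Option.map_some]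
      have he3 : PySem.Chars.lowerChar y = ' ' :=
        (Option.some_inj.mp (hw.symm.trans h1)).symm
      have : PySem.Chars.isspace y = true := by rw [← pv_isspace_lowerChar, he3]; decide
      rw [this] at hyns
      exact absurd hyns (by simp)
    · have := hwsS ((pvU s c).length - 1) y (by omega) (by omega) hsy
      rw [this] at hyns
      exact absurd hyns (by simp)
  have hm1 : 1 ≤ m := by
    by_contra h0
    have hw := pv_prefix_window low hand (t := 0) (by omega)
    have he0 : ((" and ".toList : List Char))[0]? = some ' ' := by decide
    rw [Nat.add_zero] at hw
    have hm0 : m = 0 := by omega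
    rw [hm0, he0] at hw
    rw [hlow, pv_lower_getElem?, Option.map_eq_some_iff] at hw
    obtain ⟨x0, hx0, hx0e⟩ := hw
    have hx0ws : PySem.Chars.isspace x0 = true := by
      rw [← pv_isspace_lowerChar, hx0e]
      decide
    rw [hs0ns x0 hx0] at hx0ws
    exact absurd hx0ws (by simp)
  have s1 : stepC [','] s = pvU s c := by
    conv_lhs => rw [← hUn]
    exact pv_step_cut s c ',' n (by decide) hs_l hsc (by rw [hUnlen]; omega) hcmin
  have s2 : stepC (',' :: " and ".toList) (pvU s c) = pvU s c :=
    pv_step_none_head s ',' _ c (by decide)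
      (fun q hq => hcmin q (lt_of_lt_of_le hq (pvU_len_le s c)))
  have s3 : stepC " and ".toList (pvU s c) = pvU s c :=
    pv_step_and_none s c (fun q h5 => hnoAnd q (by omega))
  have hpn_win : ∀ (d : Char), d.toNat < 65 → (d ∉ (" and ".toList : List Char)) →
      (∀ q, q < m → s[q]? ≠ some d) → ∀ q, q < (pvU s c).length → s[q]? ≠ some d := by
    intro d hd hmem hbefq q hq hqd
    rcases Nat.lt_or_ge q m with h | h
    · exact hbefq q h hqd
    · have hlt5 : q < m + 5 := by omega
      have hw := pv_prefix_window low hand (t := q - m) (by omega)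
      rw [show m + (q - m) = q by omega] at hw
      have hql := hs2l q d hd hqd
      rw [hw] at hql
      exact hmem (List.mem_of_getElem? hql)
  have s4 : stepC ['.'] (pvU s c) = pvU s c :=
    pv_step_none_head s '.' [] c (by decide) (hpn_win '.' (by decide) (by decide) hnoD)
  have s5 : stepC ['?'] (pvU s c) = pvU s c :=
    pv_step_none_head s '?' [] c (by decide) (hpn_win '?' (by decide) (by decide) hnoQ)
  have s6 : stepC ['!'] (pvU s c) = pvU s c :=
    pv_step_none_head s '!' [] c (by decide) (hpn_win '!' (by decide) (by decide) hnoE)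
  have hA : (trim_segment_py text).toList =
      PySem.Chars.stripChars
        (stepC "!".toList (stepC "?".toList (stepC ".".toList (stepC " and ".toList
          (stepC ", and ".toList (stepC ",".toList s)))))) (" .,!?".toList) := by
    simp only [trim_segment_py, List.foldl_cons, List.foldl_nil, PySem.Str.toList_stripChars,
      aStep_toList, PySem.Str.toList_strip, ← hs]
  have hB : (trim_segment_py_alt text).toList =
      PySem.Chars.stripChars (PySem.Chars.strip (s.take m)) (" .,!?".toList) := by
    simp only [trim_segment_py_alt, PySem.Str.toList_stripChars, PySem.Str.toList_strip,
      PySem.Str.toList_slice, PySem.Chars.slice_eq_listSlice, PySem.Str.toList_lower,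
      ← hs, ← hlow, ← hm]
    rw [PySem.List.slice_to _ (by positivity)]
    simp
  have t1 : (",".toList : List Char) = [','] := by decide
  have t2 : (", and ".toList : List Char) = ',' :: " and ".toList := by decide
  have t4 : (".".toList : List Char) = ['.'] := by decide
  have t5 : ("?".toList : List Char) = ['?'] := by decide
  have t6 : ("!".toList : List Char) = ['!'] := by decide
  have hAval : PySem.Chars.stripChars (pvU s c) (" .,!?".toList) = pvU s c := by
    apply pv_stripChars_self (v := pvU s c)
      (by intro he; rw [he] at hlen_lb; simp at hlen_lb)
    · intro x hx
      have hx' : s[0]? = some x := by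
        rw [← pvU_getElem? s c (by omega)]
        exact hx
      by_contra hcon
      have hct : ((" .,!?".toList : List Char).contains x) = true := by
        cases hcc : ((" .,!?".toList : List Char).contains x)
        · exact absurd hcc hcon
        · rfl
      have hmem : x ∈ (" .,!?".toList : List Char) := by simpa using hct
      fin_cases hmem
      · exact absurd (hs0ns _ hx') (by decide)
      · exact hnoD 0 (by omega) hx'
      · exact hnoC 0 (by omega) hx'
      · exact hnoE 0 (by omega) hx'
      · exact hnoQ 0 (by omega) hx'
    · intro x hx
      have he14 : (pvU s c).length - 1 = m + 3 := by omega
      rw [he14] at hx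
      have hx' : s[m + 3]? = some x := by
        rw [← pvU_getElem? s c (by omega)]
        exact hx
      have hw := pv_prefix_window low hand (t := 3) (by omega)
      have he3 : ((" and ".toList : List Char))[3]? = some 'd' := by decide
      rw [he3] at hw
      have h1 : low[m + 3]? = some (PySem.Chars.lowerChar x) := by
        rw [hlow, pv_lower_getElem?, hx', Option.map_some]
      have hlx : PySem.Chars.lowerChar x = 'd' :=
        (Option.some_inj.mp (hw.symm.trans h1)).symm
      by_contra hcon
      have hct : ((" .,!?".toList : List Char).contains x) = true := by
        cases hcc : ((" .,!?".toList : List Char).contains x)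
        · exact absurd hcc hcon
        · rfl
      have hmem : x ∈ (" .,!?".toList : List Char) := by simpa using hct
      fin_cases hmem <;> exact absurd hlx (by decide)
  intro heq
  have heqL := congrArg (fun (z : String) => z.toList.length) heq
  simp only [hA, hB] at heqL
  rw [t1, t2, t4, t5, t6, s1, s2, s3, s4, s5, s6, hAval, pv_strip_take hs_l] at heqL
  have hBlen : (PySem.Chars.stripChars (PySem.Chars.rstrip (s.take m)) (" .,!?".toList)).length ≤ m :=
    le_trans (pv_stripChars_length_le _ _) (pvU_len_le s m)
  omega

set_option maxRecDepth 100000 in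
theorem trim_segment_py_changed : Claim_changed_trim_segment_py := by
  unfold Claim_changed_trim_segment_py; decide
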